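-- pv_equiv track=rewrite | github.com/coinmage777/cowork-trading-stack | polymarket-bot/perp_dashboard_api.py | _midnight_snapshot
-- ===== SOURCE A (Python) =====
-- def _midnight_snapshot(history: list[dict], date_str: str) -> dict | None:
--     """First snapshot at-or-after midnight UTC of date_str."""
--     prefix = f"{date_str}T00:00"
--     prev = None
--     for entry in history:
--         ts = entry.get("timestamp", "")
--         if ts >= prefix:
--             return prev or entry
--         prev = entry
--     return prev
-- ===== SOURCE B (Python) =====
-- def _midnight_snapshot(history: list[dict], date_str: str) -> dict | None:
--     """First snapshot at-or-after midnight UTC of date_str."""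
--     prefix = f"{date_str}T00:00"
--     flags = [entry.get("timestamp", "") >= prefix for entry in history]
--     if True not in flags:
--         return history[-1] if history else None
--     i = flags.index(True)
--     before = history[:i]
--     return (before[-1] if before else None) or history[i]
-- ===== Notes on version B (the rewrite author's own statement) =====
-- stated objective: alternative
-- what changed: Replaces A's single pass with a prev-accumulator and early return by staged whole-list passes: first materialise the boolean hit list, then a membership test, list.index, and a slice history[:i] from which the predecessor is read off; no running state is carried.
import Mathlib
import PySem

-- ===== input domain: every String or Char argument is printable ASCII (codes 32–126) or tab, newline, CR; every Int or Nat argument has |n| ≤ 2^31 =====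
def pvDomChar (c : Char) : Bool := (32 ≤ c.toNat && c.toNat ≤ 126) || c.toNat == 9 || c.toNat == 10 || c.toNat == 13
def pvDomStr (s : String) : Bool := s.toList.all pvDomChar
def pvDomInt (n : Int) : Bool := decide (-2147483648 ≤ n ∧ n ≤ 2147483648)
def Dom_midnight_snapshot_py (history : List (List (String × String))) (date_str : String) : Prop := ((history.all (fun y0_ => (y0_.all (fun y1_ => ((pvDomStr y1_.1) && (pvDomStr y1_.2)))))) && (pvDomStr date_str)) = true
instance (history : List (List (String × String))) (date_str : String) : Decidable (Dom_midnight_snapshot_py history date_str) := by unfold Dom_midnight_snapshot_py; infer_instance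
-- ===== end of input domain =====

-- B replaces A's stateful early-return loop by staged whole-list passes: a boolean hit list,
-- membership test, list.index, and a slice history[:i] (objective: alternative, same O(n) cost).

-- ===== PORT A =====
-- A's loop: carries `prev`, returns `prev or entry` at the first hit, else the last prev
def pvGoA (pre : String) : List (List (String × String)) → Option (List (String × String)) → Option (List (String × String))
  | [], prev => prev
  | e :: rest, prev =>
    let ts := (e.lookup "timestamp").getD ""   -- entry.get("timestamp", ""): first match in the assoc list
    if pre ≤ ts then                           -- Python str >= is Lean ≤ on String (code-point lexicographic)
      match prev with                          -- `prev or entry`: None or empty dict is falsy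
      | none => some e
      | some p => if p = [] then some e else some p
    else pvGoA pre rest (some e)

def midnight_snapshot_py (history : List (List (String × String))) (date_str : String) : Option (List (String × String)) :=
  let pfx := date_str ++ "T00:00"
  pvGoA pfx history none

-- ===== PORT B =====
-- entry.get("timestamp", "") >= prefix
def pvHit (pre : String) (e : List (String × String)) : Bool :=
  decide (pre ≤ (e.lookup "timestamp").getD "")

-- Python `a or b` where a : Option dict and b is always a dict value (empty dict is falsy)
def pvOrE (a : Option (List (String × String))) (b : Option (List (String × String))) : Option (List (String × String)) :=
  match a with
  | none => b
  | some p => if p = [] then b else some p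

def midnight_snapshot_py_alt (history : List (List (String × String))) (date_str : String) : Option (List (String × String)) :=
  let pfx := date_str ++ "T00:00"
  let flags := history.map (pvHit pfx)                      -- [e.get("timestamp","") >= prefix for e in history]
  if true ∈ flags then
    let i := (PySem.List.index? flags true).getD 0          -- flags.index(True); getD 0 is a totality guard (True ∈ flags)
    let before := PySem.List.slice history none (some (i : Int))   -- history[:i]
    pvOrE (if before = [] then none else PySem.List.pyGet? before (-1)) history[i]?
  else
    if history = [] then none else PySem.List.pyGet? history (-1)  -- history[-1] if history else None

-- ===== PRECONDITION & SPEC =====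
def Spec_midnight_snapshot_py (history : List (List (String × String))) (date_str : String) (out : Option (List (String × String))) : Prop := out = midnight_snapshot_py_alt history date_str
instance (history : List (List (String × String))) (date_str : String) (out : Option (List (String × String))) : Decidable (Spec_midnight_snapshot_py history date_str out) := by unfold Spec_midnight_snapshot_py; infer_instance

-- ===== CLAIM (what is proved, stated in full; the proofs are below) =====
def Claim_equal_midnight_snapshot_py : Prop := ∀ (history : List (List (String × String))) (date_str : String), Dom_midnight_snapshot_py history date_str → Spec_midnight_snapshot_py history date_str (midnight_snapshot_py history date_str)

-- ===== LEMMAS AND PROOFS =====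

-- proof-side: index of the first hit, or the length if there is none
def pvFindHit (pre : String) : List (List (String × String)) → Nat
  | [] => 0
  | e :: rest => if pvHit pre e then 0 else pvFindHit pre rest + 1

lemma pvFindHit_le (pre : String) (l : List (List (String × String))) :
    pvFindHit pre l ≤ l.length := by
  induction l with
  | nil => simp [pvFindHit]
  | cons e rest ih =>
    by_cases h : pvHit pre e
    · simp [pvFindHit, h]
    · simp [pvFindHit, h]; omega

lemma pvIndex_eq (pre : String) (l : List (List (String × String))) :
    PySem.List.index? (l.map (pvHit pre)) true =
      if pvFindHit pre l = l.length then none else some (pvFindHit pre l) := by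
  induction l with
  | nil => simp [pvFindHit, PySem.List.index?]
  | cons e rest ih =>
    by_cases h : pvHit pre e
    · rw [show (e :: rest).map (pvHit pre) = true :: rest.map (pvHit pre) by simp [h]]
      rw [PySem.List.index?_cons_self]
      simp [pvFindHit, h]
    · rw [show (e :: rest).map (pvHit pre) = false :: rest.map (pvHit pre) by simp [h]]
      rw [PySem.List.index?_cons_of_ne (rest.map (pvHit pre)) (by simp)]
      rw [ih]
      have := pvFindHit_le pre rest
      by_cases hend : pvFindHit pre rest = rest.length
      · simp [pvFindHit, h, hend]
      · have : pvFindHit pre rest + 1 ≠ (e :: rest).length := by simp; omega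
        simp [pvFindHit, h, hend]

lemma pvMem_iff (pre : String) (l : List (List (String × String))) :
    (true ∈ l.map (pvHit pre)) ↔ pvFindHit pre l ≠ l.length := by
  rw [← PySem.List.index?_isSome_iff, pvIndex_eq]
  by_cases hend : pvFindHit pre l = l.length <;> simp [hend]

lemma pvGoA_eq (pre : String) (l : List (List (String × String))) (prev : Option (List (String × String))) :
    pvGoA pre l prev =
      if pvFindHit pre l = l.length then (l.getLast?).or prev
      else pvOrE (if pvFindHit pre l = 0 then prev else l[pvFindHit pre l - 1]?) l[pvFindHit pre l]? := by
  induction l generalizing prev with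
  | nil => simp [pvGoA, pvFindHit]
  | cons e rest ih =>
    by_cases hle : pre ≤ (e.lookup "timestamp").getD ""
    · have h0 : pvFindHit pre (e :: rest) = 0 := by simp [pvFindHit, pvHit, hle]
      rw [h0]
      simp only [List.length_cons, pvGoA, hle, if_pos]
      cases prev with
      | none => simp [pvOrE]
      | some p => simp [pvOrE]
    · have hstep : pvFindHit pre (e :: rest) = pvFindHit pre rest + 1 := by
        simp [pvFindHit, pvHit, hle]
      have hA : pvGoA pre (e :: rest) prev = pvGoA pre rest (some e) := by
        simp [pvGoA, hle]
      rw [hA, ih, hstep]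
      by_cases hend : pvFindHit pre rest = rest.length
      · have hLp : pvFindHit pre rest + 1 = (e :: rest).length := by simp [hend]
        rw [if_pos hend, if_pos hLp]
        cases rest with
        | nil => simp at hend; simp [hend] at *
        | cons x xs =>
          cases hl : (x :: xs).getLast? with
          | none => simp at hl
          | some y => simp [List.getLast?_cons_cons, hl]
      · have hLn : pvFindHit pre rest + 1 ≠ (e :: rest).length := by simp [hend]
        rw [if_neg hend, if_neg hLn, if_neg (Nat.succ_ne_zero _)]
        have h1 : (e :: rest)[pvFindHit pre rest + 1 - 1]? = if pvFindHit pre rest = 0 then some e else rest[pvFindHit pre rest - 1]? := by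
          cases hj : pvFindHit pre rest with
          | zero => simp
          | succ k => simp
        have h2 : (e :: rest)[pvFindHit pre rest + 1]? = rest[pvFindHit pre rest]? := by simp
        rw [h1, h2]

-- B computed in the same normal form
lemma pvAlt_eq (history : List (List (String × String))) (date_str : String) :
    midnight_snapshot_py_alt history date_str =
      (let pre := date_str ++ "T00:00"
       if pvFindHit pre history = history.length then (history.getLast?).or none
       else pvOrE (if pvFindHit pre history = 0 then none else history[pvFindHit pre history - 1]?)
                  history[pvFindHit pre history]?) := by
  unfold midnight_snapshot_py_alt
  set pre := date_str ++ "T00:00" with hpre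
  by_cases hend : pvFindHit pre history = history.length
  · have hmem : ¬ (true ∈ history.map (pvHit pre)) := by
      rw [pvMem_iff]; simp [hend]
    simp only [hmem, if_false, hend, if_pos, Option.or_none]
    cases history with
    | nil => simp
    | cons x xs => simp [PySem.List.pyGet?_neg_one]
  · have hmem : true ∈ history.map (pvHit pre) := (pvMem_iff pre history).mpr hend
    have hlt : pvFindHit pre history < history.length :=
      lt_of_le_of_ne (pvFindHit_le pre history) hend
    simp only [hmem, if_true, hend, if_false]
    rw [pvIndex_eq, if_neg hend]
    set i := pvFindHit pre history with hi
    have hslice : PySem.List.slice history none (some ((i : Nat) : Int)) = history.take i :=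
      PySem.List.slice_to_natCast history i
    simp only [Option.getD_some, hslice]
    by_cases h0 : i = 0
    · simp [h0]
    · have hne : history.take i ≠ [] := by
        simp [List.take_eq_nil_iff]
        constructor
        · exact h0
        · intro h; rw [h] at hlt; simp at hlt
      rw [if_neg hne, if_neg h0, PySem.List.pyGet?_neg_one]
      have hlen : (history.take i).length = i := by
        rw [List.length_take]; omega
      have : (history.take i).getLast? = history[i - 1]? := by
        rw [List.getLast?_eq_getElem?, hlen, List.getElem?_take_of_lt (by omega)]
      rw [this]

-- ===== VERDICT (by name: the statement is the Claim_ definition above) =====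
theorem midnight_snapshot_py_spec : Claim_equal_midnight_snapshot_py := by
  intro history date_str _
  unfold Spec_midnight_snapshot_py midnight_snapshot_py
  rw [pvGoA_eq, pvAlt_eq]
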